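-- pv_equiv track=rewrite | github.com/jano31415/codejam | kickstart/k2022_e/probc.py | solve
-- ===== SOURCE A (Python) =====
-- def solve(n, p):
--     s = []
--     for i in range(n):
--         s.append(p[i])
--         if n%len(s) != 0:
--             continue
--         palin=True
--         for j,sj in enumerate(s):
--             if j > len(s)//2+1:
--                 break
--             if s[j] != s[-(j+1)]:
--                 palin = False
--         if not palin:
--             continue
--         issol=True
--         for j,pj in enumerate(p):
--             if p[j] != s[j%len(s)]:
--                 issol=False
--                 break
--         if issol:
--             return s
-- ===== SOURCE B (Python) =====
-- def solve(n, p):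
--     m = len(p)
--     # enumerate divisors of n in O(sqrt(n)) as pairs (d, n//d)
--     small, large = [], []
--     for d in range(1, n + 1):
--         if d * d > n:
--             break
--         if n % d == 0:
--             small.append(d)
--             if d != n // d:
--                 large.append(n // d)
--     for L in small + large[::-1]:   # all divisors of n, ascending
--         t = p[:L]
--         # L is a period of p iff p shifted by L overlaps itself
--         if p[L:] == p[:m - L] and t == t[::-1]:
--             return t
--     return None
-- ===== Notes on version B (the rewrite author's own statement) =====
-- stated objective: alternative
-- what changed: B abandons A's element-by-element prefix building and O(n) scan of all lengths 1..n: it enumerates the divisors of n in O(sqrt(n)) as pairs (d, n//d), concatenates the two halves into the ascending divisor list, tests tiling by the self-overlap identity p[L:] == p[:m-L] (L is a period of p) instead of A's modular-index loop, and tests the palindrome by slice reversal instead of A's bounded two-index flag loop.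
-- outside the precondition, e.g. on solve(5, [1, 2]): A raises IndexError, B returns None; on solve(6, [1, 1, 1]): A returns [1], B returns [1]
import Mathlib
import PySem

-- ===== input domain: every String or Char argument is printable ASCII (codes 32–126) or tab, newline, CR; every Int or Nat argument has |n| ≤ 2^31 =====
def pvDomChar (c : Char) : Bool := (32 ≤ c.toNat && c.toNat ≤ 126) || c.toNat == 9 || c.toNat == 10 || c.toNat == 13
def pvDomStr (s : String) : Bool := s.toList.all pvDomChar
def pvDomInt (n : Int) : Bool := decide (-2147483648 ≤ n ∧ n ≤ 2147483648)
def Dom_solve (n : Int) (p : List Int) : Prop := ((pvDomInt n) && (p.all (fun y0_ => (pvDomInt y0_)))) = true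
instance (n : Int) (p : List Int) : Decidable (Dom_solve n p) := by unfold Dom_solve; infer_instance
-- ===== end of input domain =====

set_option maxRecDepth 4000


-- B replaces A's scan of every length 1..n by an O(sqrt n) divisor-pair enumeration and
-- tests tiling by the self-overlap identity p[L:] == p[:m-L] instead of A's modular loop
-- (objective: alternative algorithm, similar overall cost).

-- ===== PORT A =====
-- inner loop `for j,sj in enumerate(s): if j > len(s)//2+1: break; if s[j] != s[-(j+1)]: palin = False`
def palinLoop (s : List Int) : List (Int × Int) → Bool → Bool
  | [], palin => palin
  | (j, _) :: rest, palin =>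
    if j > PySem.Int.floordiv (s.length : Int) 2 + 1 then palin
    else palinLoop s rest
      (if PySem.List.pyGetD s j 0 ≠ PySem.List.pyGetD s (-(j + 1)) 0 then false else palin)

-- inner loop `for j,pj in enumerate(p): if p[j] != s[j%len(s)]: issol=False; break`
def issolLoop (p s : List Int) : List (Int × Int) → Bool
  | [] => true
  | (j, _) :: rest =>
    if PySem.List.pyGetD p j 0 ≠ PySem.List.pyGetD s (PySem.Int.mod j (s.length : Int)) 0 then false
    else issolLoop p s rest

-- main loop `for i in range(n)` with accumulator s; p[i] out of range = IndexError = none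
def solveLoop (n : Int) (p : List Int) : List Int → List Int → Option (List Int)
  | [], _ => none
  | i :: rest, s =>
    match PySem.List.pyGet? p i with
    | none => none
    | some v =>
      let s' := s ++ [v]
      if PySem.Int.mod n (s'.length : Int) ≠ 0 then solveLoop n p rest s'
      else if !(palinLoop s' (PySem.List.enumerate s') true) then solveLoop n p rest s'
      else if issolLoop p s' (PySem.List.enumerate p) then some s'
      else solveLoop n p rest s'

def solve (n : Int) (p : List Int) : Option (List Int) :=
  solveLoop n p (PySem.List.pyRange 0 n 1) []

-- ===== PORT B =====
-- `for d in range(1, n+1): if d*d>n: break; if n%d==0: small.append(d); if d != n//d: large.append(n//d)`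
def divLoop (n : Int) : List Int → List Int × List Int → List Int × List Int
  | [], acc => acc
  | d :: rest, (small, large) =>
    if d * d > n then (small, large)
    else if PySem.Int.mod n d = 0 then
      divLoop n rest (small ++ [d],
        if d ≠ PySem.Int.floordiv n d then large ++ [PySem.Int.floordiv n d] else large)
    else divLoop n rest (small, large)

-- `for L in small + large[::-1]: t = p[:L]; if p[L:] == p[:m-L] and t == t[::-1]: return t`
def tryLens (p : List Int) : List Int → Option (List Int)
  | [] => none
  | L :: rest =>
    let t := PySem.List.slice p none (some L)
    if PySem.List.slice p (some L) none == PySem.List.slice p none (some ((p.length : Int) - L))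
        && t == t.reverse
    then some t
    else tryLens p rest

def solve_alt (n : Int) (p : List Int) : Option (List Int) :=
  let sl := divLoop n (PySem.List.pyRange 1 (n + 1) 1) ([], [])
  tryLens p (sl.1 ++ sl.2.reverse)

-- ===== PRECONDITION & SPEC =====
-- Pre_ excludes n > len(p), on which A's main loop hits `p[i]` out of range and raises
-- IndexError unless some prefix of length ≤ len(p) already succeeded (on those early-return
-- inputs A and B agree anyway; the cites in claim.json show both kinds).
def Pre_solve (n : Int) (p : List Int) : Prop := n ≤ (p.length : Int)
instance (n : Int) (p : List Int) : Decidable (Pre_solve n p) := by unfold Pre_solve; infer_instance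

def pvWitness_solve : Int × List Int := (4, [1, 2, 2, 1])

def Spec_solve (n : Int) (p : List Int) (out : Option (List Int)) : Prop := out = solve_alt n p
instance (n : Int) (p : List Int) (out : Option (List Int)) : Decidable (Spec_solve n p out) := by unfold Spec_solve; infer_instance

-- ===== CLAIM (what is proved, stated in full; the proofs are below) =====
def Claim_equal_solve : Prop := ∀ (n : Int) (p : List Int), Dom_solve n p → Pre_solve n p → Spec_solve n p (solve n p)

-- ===== LEMMAS AND PROOFS =====

-- B's test on a candidate length, as a named predicate (proof-side only)
def condB (p : List Int) (L : Int) : Bool :=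
  PySem.List.slice p (some L) none == PySem.List.slice p none (some ((p.length : Int) - L))
    && PySem.List.slice p none (some L) == (PySem.List.slice p none (some L)).reverse

theorem tryLens_eq (p : List Int) (l : List Int) :
    tryLens p l = (l.find? (condB p)).map (fun L => PySem.List.slice p none (some L)) := by
  induction l with
  | nil => rfl
  | cons L rest ih =>
    show (if PySem.List.slice p (some L) none == PySem.List.slice p none (some ((p.length : Int) - L))
        && PySem.List.slice p none (some L) == (PySem.List.slice p none (some L)).reverse
      then some (PySem.List.slice p none (some L)) else tryLens p rest) = _
    rw [List.find?_cons]
    cases h : condB p L with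
    | true => rw [if_pos (by simpa [condB] using h)]; rfl
    | false => rw [if_neg (by simpa [condB] using h)]; exact ih

theorem pyGetD_neg (s : List Int) (j : Nat) (h : j < s.length) :
    PySem.List.pyGetD s (-(j+1) : Int) 0 = s[s.length - 1 - j] := by
  simp only [PySem.List.pyGetD, PySem.List.pyGet?, PySem.List.pyIdx?]
  rw [if_neg (by omega), if_pos (by omega)]
  have : s.length - (- -((j:Int) + 1)).toNat = s.length - 1 - j := by omega
  rw [this]
  simp [List.getElem?_eq_getElem (show s.length - 1 - j < s.length by omega)]

theorem pyGetD_pos (s : List Int) (j : Nat) (h : j < s.length) :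
    PySem.List.pyGetD s (j : Int) 0 = s[j] := by
  rw [PySem.List.pyGetD_natCast]
  simp [List.getD, List.getElem?_eq_getElem h]

theorem palinLoop_eq (s : List Int) (l : List (Int × Int)) (b : Bool) :
    palinLoop s l b = (b && (l.takeWhile (fun q => decide (q.1 ≤ PySem.Int.floordiv (s.length : Int) 2 + 1))).all
      (fun q => PySem.List.pyGetD s q.1 0 == PySem.List.pyGetD s (-(q.1+1)) 0)) := by
  induction l generalizing b with
  | nil => simp [palinLoop]
  | cons a l ih =>
    obtain ⟨j, x⟩ := a
    by_cases hj : PySem.Int.floordiv (s.length : Int) 2 + 1 < j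
    · have hd : decide (j ≤ PySem.Int.floordiv (s.length : Int) 2 + 1) = false := decide_eq_false (by omega)
      simp only [palinLoop, if_pos hj, List.takeWhile_cons, hd]
      simp
    · have hd : decide (j ≤ PySem.Int.floordiv (s.length : Int) 2 + 1) = true := decide_eq_true (by omega)
      simp only [palinLoop, if_neg hj, List.takeWhile_cons, hd, if_true]
      rw [ih]
      by_cases hm : PySem.List.pyGetD s j 0 = PySem.List.pyGetD s (-(j+1)) 0
      · simp [hm]
      · simp [show PySem.List.pyGetD s (-1 + -j) 0 = PySem.List.pyGetD s (-(j+1)) 0 from by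
          rw [show (-1 + -j : Int) = -(j+1) from by ring], hm]

theorem all_takeWhile_le (c : Int) (f : Int × Int → Bool) (l : List (Int × Int))
    (hp : l.Pairwise (fun a b => a.1 < b.1)) :
    (l.takeWhile (fun q => decide (q.1 ≤ c))).all f = l.all (fun q => !decide (q.1 ≤ c) || f q) := by
  induction l with
  | nil => rfl
  | cons a l ih =>
    rcases List.pairwise_cons.mp hp with ⟨ha, hl⟩
    by_cases hc : a.1 ≤ c
    · simp only [List.takeWhile_cons, decide_eq_true hc, if_true, List.all_cons, ih hl]
      simp
    · simp only [List.takeWhile_cons, decide_eq_false hc, Bool.false_eq_true, if_false,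
        List.all_nil, List.all_cons, decide_eq_false hc]
      have : l.all (fun q => !decide (q.1 ≤ c) || f q) = true := by
        rw [List.all_eq_true]; intro q hq
        simp [decide_eq_false (show ¬ (q.1 ≤ c) by have := ha q hq; omega)]
      simp [this]

theorem palin_iff (s : List Int) :
    (s == s.reverse) = decide (∀ k, (hk : k < s.length) → k ≤ s.length/2 + 1 → s[k] = s[s.length - 1 - k]) := by
  rw [Bool.eq_iff_iff]
  simp only [beq_iff_eq, decide_eq_true_eq]
  constructor
  · intro h k hk hb
    calc s[k] = s.reverse[k]'(h ▸ hk) := List.getElem_of_eq h hk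
      _ = s[s.length - 1 - k] := by rw [List.getElem_reverse]
  · intro h
    apply List.ext_getElem (by simp)
    intro k h1 h2
    rw [List.getElem_reverse]
    by_cases hb : k ≤ s.length/2 + 1
    · exact h k h1 hb
    · have h2' := h (s.length - 1 - k) (by omega) (by omega)
      simp only [show s.length - 1 - (s.length - 1 - k) = k from by omega] at h2'
      exact h2'.symm

theorem palinCheck_eq (s : List Int) : palinLoop s (PySem.List.enumerate s) true = (s == s.reverse) := by
  rw [palinLoop_eq, Bool.true_and,
    all_takeWhile_le _ _ _ (by apply PySem.List.pairwise_lt_enumerate),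
    palin_iff, Bool.eq_iff_iff]
  simp only [List.all_eq_true, PySem.List.mem_enumerate_iff, decide_eq_true_eq]
  have hfd : PySem.Int.floordiv ((s.length : Int)) 2 = ((s.length / 2 : Nat) : Int) := by
    exact_mod_cast PySem.Int.floordiv_natCast s.length 2
  constructor
  · intro h k hk hb
    have := h (0 + (k : Int), s[k]) ⟨k, hk, rfl⟩
    simp only [zero_add, Bool.or_eq_true, Bool.not_eq_true', decide_eq_false_iff_not] at this
    rcases this with h1 | h1
    · exfalso
      rw [hfd] at h1
      omega
    · rw [pyGetD_pos s k hk, pyGetD_neg s k hk, beq_iff_eq] at h1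
      exact h1
  · intro h q hq
    rcases hq with ⟨k, hk, rfl⟩
    simp only [zero_add]
    by_cases hb : (k : Int) ≤ PySem.Int.floordiv (s.length : Int) 2 + 1
    · rw [Bool.or_eq_true]
      right
      rw [pyGetD_pos s k hk, pyGetD_neg s k hk, beq_iff_eq]
      apply h k hk
      rw [hfd] at hb
      exact_mod_cast hb
    · rw [Bool.or_eq_true]
      left
      simp only [Bool.not_eq_true', decide_eq_false_iff_not]
      exact hb

theorem issolLoop_eq (p s : List Int) (l : List (Int × Int)) :
    issolLoop p s l = l.all
      (fun q => PySem.List.pyGetD p q.1 0 == PySem.List.pyGetD s (PySem.Int.mod q.1 (s.length : Int)) 0) := by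
  induction l with
  | nil => rfl
  | cons a l ih =>
    obtain ⟨j, x⟩ := a
    by_cases hm : PySem.List.pyGetD p j 0 = PySem.List.pyGetD s (PySem.Int.mod j (s.length : Int)) 0
    · rw [show issolLoop p s ((j, x) :: l) = if PySem.List.pyGetD p j 0 ≠
          PySem.List.pyGetD s (PySem.Int.mod j (s.length : Int)) 0 then false
          else issolLoop p s l from rfl,
        if_neg (not_not_intro hm), ih, List.all_cons]
      simp [hm]
    · rw [show issolLoop p s ((j, x) :: l) = if PySem.List.pyGetD p j 0 ≠
          PySem.List.pyGetD s (PySem.Int.mod j (s.length : Int)) 0 then false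
          else issolLoop p s l from rfl,
        if_pos hm, List.all_cons]
      simp [hm]

theorem issolCheck_eq (p s : List Int) (hs : 0 < s.length) :
    issolLoop p s (PySem.List.enumerate p) =
      decide (∀ j, (hj : j < p.length) → p[j] = s[j % s.length]'(Nat.mod_lt _ hs)) := by
  rw [issolLoop_eq, Bool.eq_iff_iff]
  simp only [List.all_eq_true, PySem.List.mem_enumerate_iff, decide_eq_true_eq]
  have hmod : ∀ j : Nat, PySem.Int.mod ((j : Nat) : Int) ((s.length : Nat) : Int) = ((j % s.length : Nat) : Int) :=
    fun j => PySem.Int.mod_natCast j s.length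
  constructor
  · intro h j hj
    have := h (0 + (j : Int), p[j]) ⟨j, hj, rfl⟩
    simp only [zero_add] at this
    rw [hmod j, pyGetD_pos p j hj, pyGetD_pos s _ (Nat.mod_lt _ hs), beq_iff_eq] at this
    exact this
  · intro h q hq
    rcases hq with ⟨j, hj, rfl⟩
    simp only [zero_add]
    rw [hmod j, pyGetD_pos p j hj, pyGetD_pos s _ (Nat.mod_lt _ hs), beq_iff_eq]
    exact h j hj

-- the self-overlap identity: p[L:] == p[:m-L] iff p tiles with period L
theorem shift_eq (p : List Int) (L : Nat) (h1 : 1 ≤ L) (h2 : L ≤ p.length) :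
    (p.drop L == p.take (p.length - L)) = issolLoop p (p.take L) (PySem.List.enumerate p) := by
  have hlen : (p.take L).length = L := by simp [h2]
  have hmlt : ∀ j : Nat, j % L < L := fun j => Nat.mod_lt _ (by omega)
  have hval : ∀ j, (hj : j < p.length) →
      (p.take L)[j % (p.take L).length]'(Nat.mod_lt _ (by rw [hlen]; omega)) =
        p[j % L]'(by have := hmlt j; omega) := by
    intro j hj
    have e1 : (p.take L)[j % (p.take L).length]'(Nat.mod_lt _ (by rw [hlen]; omega)) =
        (p.take L)[j % L]'(by rw [hlen]; exact hmlt j) :=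
      getElem_congr_idx (by rw [hlen])
    rw [e1, List.getElem_take]
  rw [issolCheck_eq p (p.take L) (by omega), Bool.eq_iff_iff]
  simp only [beq_iff_eq, decide_eq_true_eq]
  constructor
  · intro h
    have key : ∀ j, j < p.length → p[j]? = p[j % L]? := by
      intro j
      induction j using Nat.strong_induction_on with
      | _ j ihj =>
        intro hj
        by_cases hjL : j < L
        · rw [Nat.mod_eq_of_lt hjL]
        · have hLj : L ≤ j := by omega
          have e0 := congrArg (fun l => l[j - L]?) h
          simp only [List.getElem?_drop, List.getElem?_take] at e0
          have hc1 : j - L < p.length - L := by omega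
          have hc2 : L + (j - L) = j := by omega
          rw [if_pos hc1, hc2] at e0
          rw [e0, ihj (j - L) (by omega) (by omega), Nat.mod_eq_sub_mod hLj]
    intro j hj
    rw [hval j hj]
    have k := key j hj
    rw [List.getElem?_eq_getElem hj,
      List.getElem?_eq_getElem (show j % L < p.length by have := hmlt j; omega)] at k
    exact Option.some.inj k
  · intro h
    have hkey : ∀ j, j < p.length → p[j]? = p[j % L]? := by
      intro j hj
      rw [List.getElem?_eq_getElem hj,
        List.getElem?_eq_getElem (show j % L < p.length by have := hmlt j; omega)]
      exact congrArg some ((h j hj).trans (hval j hj))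
    apply List.ext_getElem?
    intro i
    rw [List.getElem?_drop, List.getElem?_take]
    by_cases hi : i < p.length - L
    · rw [if_pos hi, hkey (L + i) (by omega), hkey i (by omega), Nat.add_mod_left]
    · rw [if_neg hi, List.getElem?_eq_none (by omega)]

theorem condB_eq (p : List Int) (L : Nat) (h1 : 1 ≤ L) (h2 : L ≤ p.length) :
    condB p (L : Int) = (issolLoop p (p.take L) (PySem.List.enumerate p)
      && (p.take L == (p.take L).reverse)) := by
  have hsf : PySem.List.slice p (some (L : Int)) none = p.drop L :=
    PySem.List.slice_from_natCast p L
  have hto : PySem.List.slice p none (some (L : Int)) = p.take L :=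
    PySem.List.slice_to_natCast p L
  have hc : ((p.length : Int) - (L : Int)) = ((p.length - L : Nat) : Int) := by omega
  have hto2 : PySem.List.slice p none (some ((p.length : Int) - (L : Int))) = p.take (p.length - L) := by
    rw [hc]; exact PySem.List.slice_to_natCast p _
  rw [condB, hsf, hto, hto2, shift_eq p L h1 h2]

-- A's main loop computes find? over the whole range with the combined test
theorem loop_eq (n : Int) (p : List Int) (hnm : n ≤ (p.length : Int)) :
    ∀ (k : Nat) (i : Nat), (n - i).toNat = k →
      solveLoop n p (PySem.List.pyRange i n 1) (p.take i) =
      ((PySem.List.pyRange ((i : Int) + 1) (n + 1) 1).find?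
          (fun L => PySem.Int.mod n L == 0 && condB p L)).map
        (fun L => PySem.List.slice p none (some L)) := by
  intro k
  induction k with
  | zero =>
    intro i hi
    rw [PySem.List.pyRange_one_eq_nil (by omega), PySem.List.pyRange_one_eq_nil (by omega)]
    rfl
  | succ k ih =>
    intro i hi
    have hin : (i : Int) < n := by omega
    have him : i < p.length := by omega
    have hcast : ((i + 1 : Nat) : Int) = (i : Int) + 1 := by push_cast; ring
    rw [PySem.List.pyRange_one_cons hin]
    have hget : PySem.List.pyGet? p ((i : Nat) : Int) = some (p[i]'him) := by
      rw [PySem.List.pyGet?_natCast]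
      exact List.getElem?_eq_getElem him
    have hs' : p.take i ++ [p[i]'him] = p.take (i + 1) := by
      rw [List.take_add_one, List.getElem?_eq_getElem him]
      rfl
    have hlen : ((p.take (i + 1)).length : Int) = (i : Int) + 1 := by
      simp [Nat.min_eq_left (by omega : i + 1 ≤ p.length)]
    have hstep : solveLoop n p ((i : Int) :: PySem.List.pyRange ((i : Int) + 1) n 1) (p.take i) =
        (if PySem.Int.mod n (((p.take (i + 1)).length : Nat) : Int) ≠ 0 then
           solveLoop n p (PySem.List.pyRange ((i : Int) + 1) n 1) (p.take (i + 1))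
         else if !(palinLoop (p.take (i + 1)) (PySem.List.enumerate (p.take (i + 1))) true) then
           solveLoop n p (PySem.List.pyRange ((i : Int) + 1) n 1) (p.take (i + 1))
         else if issolLoop p (p.take (i + 1)) (PySem.List.enumerate p) then some (p.take (i + 1))
         else solveLoop n p (PySem.List.pyRange ((i : Int) + 1) n 1) (p.take (i + 1))) := by
      rw [solveLoop, hget]
      dsimp only
      rw [hs']
    rw [hstep]
    have hrec : solveLoop n p (PySem.List.pyRange ((i : Int) + 1) n 1) (p.take (i + 1)) =
        ((PySem.List.pyRange ((i : Int) + 1 + 1) (n + 1) 1).find?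
            (fun L => PySem.Int.mod n L == 0 && condB p L)).map
          (fun L => PySem.List.slice p none (some L)) := by
      have := ih (i + 1) (by omega)
      rw [hcast] at this
      exact this
    have hBcons : PySem.List.pyRange ((i : Int) + 1) (n + 1) 1 =
        ((i : Int) + 1) :: PySem.List.pyRange ((i : Int) + 1 + 1) (n + 1) 1 :=
      PySem.List.pyRange_one_cons (by omega)
    have hpalin := palinCheck_eq (p.take (i + 1))
    have hcond := condB_eq p (i + 1) (by omega) (by omega)
    rw [hcast] at hcond
    have hslice : PySem.List.slice p none (some ((i : Int) + 1)) = p.take (i + 1) := by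
      rw [PySem.List.slice_to]
      congr 1
      omega
    rw [hBcons, List.find?_cons]
    by_cases hc1 : PySem.Int.mod n ((i : Int) + 1) = 0
    · -- divisibility holds
      rw [if_neg (by rw [hlen]; exact not_not_intro hc1)]
      cases hc2 : (p.take (i + 1) == (p.take (i + 1)).reverse) with
      | false =>
        rw [if_pos (by rw [hpalin, hc2]; rfl)]
        have : (PySem.Int.mod n ((i : Int) + 1) == 0 && condB p ((i : Int) + 1)) = false := by
          rw [hcond, hc2]
          simp
        rw [this]
        exact hrec
      | true =>
        rw [if_neg (by rw [hpalin, hc2]; simp)]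
        cases hc3 : issolLoop p (p.take (i + 1)) (PySem.List.enumerate p) with
        | false =>
          rw [if_neg (by simp)]
          have : (PySem.Int.mod n ((i : Int) + 1) == 0 && condB p ((i : Int) + 1)) = false := by
            rw [hcond, hc2, hc3]
            simp
          rw [this]
          exact hrec
        | true =>
          rw [if_pos rfl]
          have : (PySem.Int.mod n ((i : Int) + 1) == 0 && condB p ((i : Int) + 1)) = true := by
            rw [hcond, hc2, hc3]
            simp only [Bool.and_true]
            simpa using hc1
          rw [this]
          simp only [Option.map_some, hslice]
    · -- n % (i+1) ≠ 0 : both sides skip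
      rw [if_pos (by rw [hlen]; exact hc1)]
      have hb : (PySem.Int.mod n ((i : Int) + 1) == 0) = false := by
        simpa using hc1
      rw [hb, Bool.false_and]
      exact hrec

-- divLoop characterized as filters over the prefix cut at the first d with d*d > n
theorem divLoop_eq (n : Int) (l : List Int) (s t : List Int) :
    divLoop n l (s, t) =
      (s ++ ((l.takeWhile (fun d => decide (d * d ≤ n))).filter
              (fun d => PySem.Int.mod n d == 0)),
       t ++ (((l.takeWhile (fun d => decide (d * d ≤ n))).filter
              (fun d => PySem.Int.mod n d == 0 && d != PySem.Int.floordiv n d)).map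
              (fun d => PySem.Int.floordiv n d))) := by
  induction l generalizing s t with
  | nil => simp [divLoop]
  | cons d rest ih =>
    have hstep : divLoop n (d :: rest) (s, t) =
        (if d * d > n then (s, t)
         else if PySem.Int.mod n d = 0 then
           divLoop n rest (s ++ [d],
             if d ≠ PySem.Int.floordiv n d then t ++ [PySem.Int.floordiv n d] else t)
         else divLoop n rest (s, t)) := rfl
    by_cases hbig : d * d > n
    · have hd : decide (d * d ≤ n) = false := decide_eq_false (by omega)
      rw [hstep, if_pos hbig, List.takeWhile_cons, hd]
      simp
    · have hd : decide (d * d ≤ n) = true := decide_eq_true (by omega)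
      rw [hstep, if_neg hbig, List.takeWhile_cons, hd]
      by_cases hdvd : PySem.Int.mod n d = 0
      · rw [if_pos hdvd]
        by_cases hne : d ≠ PySem.Int.floordiv n d
        · rw [if_pos hne, ih]
          simp [List.filter_cons, hdvd, hne, List.append_assoc]
        · rw [if_neg hne, ih]
          simp only [not_not] at hne
          have hbne : (d != PySem.Int.floordiv n d) = false := by rw [← hne]; simp
          simp [List.filter_cons, hdvd, hbne, List.append_assoc]
      · rw [if_neg hdvd, ih]
        simp [List.filter_cons, hdvd]

theorem find?_filter' (l : List Int) (q c : Int → Bool) :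
    (l.filter q).find? c = l.find? (fun x => q x && c x) := by
  induction l with
  | nil => rfl
  | cons a l ih =>
    by_cases hq : q a
    · rw [List.filter_cons_of_pos hq, List.find?_cons, List.find?_cons, hq, Bool.true_and]
      cases hc : c a
      · exact ih
      · rfl
    · rw [List.filter_cons_of_neg (by simpa using hq), List.find?_cons]
      have hqa : (q a && c a) = false := by simp [hq]
      rw [hqa]
      exact ih

theorem eq_of_pairwise_lt_of_mem_iff (l1 l2 : List Int)
    (h1 : l1.Pairwise (· < ·)) (h2 : l2.Pairwise (· < ·))
    (hm : ∀ x, x ∈ l1 ↔ x ∈ l2) : l1 = l2 := by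
  induction l1 generalizing l2 with
  | nil =>
    cases l2 with
    | nil => rfl
    | cons b m => exact absurd ((hm b).mpr List.mem_cons_self) (by simp)
  | cons a l ih =>
    cases l2 with
    | nil => exact absurd ((hm a).mp List.mem_cons_self) (by simp)
    | cons b m =>
      rcases List.pairwise_cons.mp h1 with ⟨ha, hl⟩
      rcases List.pairwise_cons.mp h2 with ⟨hb, hmm⟩
      have hab : a = b := by
        have h1' := (hm a).mp List.mem_cons_self
        have h2' := (hm b).mpr List.mem_cons_self
        rcases List.mem_cons.mp h1' with h | h
        · exact h
        · rcases List.mem_cons.mp h2' with h' | h'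
          · exact h'.symm
          · have := hb a h; have := ha b h'; omega
      subst hab
      have htail : ∀ x, x ∈ l ↔ x ∈ m := by
        intro x
        constructor
        · intro hx
          rcases List.mem_cons.mp ((hm x).mp (List.mem_cons_of_mem _ hx)) with h | h
          · exact absurd (ha x hx) (by omega)
          · exact h
        · intro hx
          rcases List.mem_cons.mp ((hm x).mpr (List.mem_cons_of_mem _ hx)) with h | h
          · exact absurd (hb x hx) (by omega)
          · exact h
      rw [ih m hl hmm htail]

-- arithmetic facts about the cofactor n // d of a divisor d of n
theorem div_facts (n d : Int) (h1 : 1 ≤ d) (h2 : d ≤ n) (h3 : PySem.Int.mod n d = 0) :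
    1 ≤ PySem.Int.floordiv n d ∧ PySem.Int.floordiv n d ≤ n ∧
    PySem.Int.floordiv n d * d = n ∧ PySem.Int.mod n (PySem.Int.floordiv n d) = 0 ∧
    PySem.Int.floordiv n (PySem.Int.floordiv n d) = d := by
  have hd0 : 0 < d := by omega
  have hdvd : d ∣ n := (PySem.Int.mod_eq_zero_iff_dvd n d).mp h3
  have hfd : PySem.Int.floordiv n d = n / d := PySem.Int.floordiv_eq_ediv_of_pos hd0
  have he : n / d * d = n := Int.ediv_mul_cancel hdvd
  have he1 : 1 ≤ n / d := by
    by_cases h : 1 ≤ n / d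
    · exact h
    · exfalso
      rw [not_le] at h
      have : n / d * d ≤ 0 := mul_nonpos_of_nonpos_of_nonneg (by omega) (by omega)
      omega
  have he2 : n / d ≤ n := by
    calc n / d = n / d * 1 := (mul_one _).symm
      _ ≤ n / d * d := mul_le_mul_of_nonneg_left h1 (by omega)
      _ = n := he
  have hedvd : (n / d) ∣ n := ⟨d, he.symm⟩
  have hm2 : PySem.Int.mod n (n / d) = 0 := (PySem.Int.mod_eq_zero_iff_dvd n (n / d)).mpr hedvd
  have hf2 : PySem.Int.floordiv n (n / d) = d := by
    rw [PySem.Int.floordiv_eq_ediv_of_pos (by omega : (0:Int) < n / d)]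
    calc n / (n / d) = (n / d * d) / (n / d) := by rw [he]
      _ = d := Int.mul_ediv_cancel_left (a := n / d) d (by omega)
  rw [hfd]
  exact ⟨he1, he2, he, hm2, hf2⟩

theorem takeWhile_eq_filter_of_pairwise (q : Int → Bool) (l : List Int)
    (h : l.Pairwise (fun a b => q b = true → q a = true)) : l.takeWhile q = l.filter q := by
  induction l with
  | nil => rfl
  | cons a t ih =>
    rcases List.pairwise_cons.mp h with ⟨ha, ht⟩
    cases hq : q a with
    | true =>
      rw [List.takeWhile_cons, hq, List.filter_cons_of_pos hq]
      simp [ih ht]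
    | false =>
      rw [List.takeWhile_cons, hq, List.filter_cons_of_neg (by simp [hq])]
      have hnil : t.filter q = [] := List.filter_eq_nil_iff.mpr
        (fun b hb hqb => by rw [ha b hb hqb] at hq; cases hq)
      simp [hnil]

-- the two halves concatenate to the ascending list of divisors of n in [1, n]
theorem halves_eq (n : Int) :
    (divLoop n (PySem.List.pyRange 1 (n + 1) 1) ([], [])).1 ++
      (divLoop n (PySem.List.pyRange 1 (n + 1) 1) ([], [])).2.reverse =
      (PySem.List.pyRange 1 (n + 1) 1).filter (fun d => PySem.Int.mod n d == 0) := by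
  rw [divLoop_eq]
  have hmemR : ∀ x, x ∈ PySem.List.pyRange 1 (n + 1) 1 ↔ 1 ≤ x ∧ x ≤ n := by
    intro x
    rw [PySem.List.mem_pyRange_one]
    omega
  have hTW : (PySem.List.pyRange 1 (n + 1) 1).takeWhile (fun d => decide (d * d ≤ n)) =
      (PySem.List.pyRange 1 (n + 1) 1).filter (fun d => decide (d * d ≤ n)) := by
    apply takeWhile_eq_filter_of_pairwise
    apply List.Pairwise.imp_of_mem ?_ (PySem.List.pairwise_lt_pyRange_one 1 (n + 1))
    intro a b hma hmb hab hb
    have ha1 : 1 ≤ a := ((hmemR a).mp hma).1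
    simp only [decide_eq_true_eq] at hb ⊢
    calc a * a ≤ b * b := mul_le_mul hab.le hab.le (by omega) (by omega)
      _ ≤ n := hb
  rw [hTW]
  simp only [List.nil_append]
  have hsmall : ∀ x, x ∈ ((PySem.List.pyRange 1 (n + 1) 1).filter
        (fun d => decide (d * d ≤ n))).filter (fun d => PySem.Int.mod n d == 0) ↔
      (1 ≤ x ∧ x ≤ n ∧ x * x ≤ n ∧ PySem.Int.mod n x = 0) := by
    intro x
    simp only [List.mem_filter, hmemR, decide_eq_true_eq, beq_iff_eq]
    tauto
  have hlarge : ∀ x, x ∈ (((PySem.List.pyRange 1 (n + 1) 1).filter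
        (fun d => decide (d * d ≤ n))).filter
          (fun d => PySem.Int.mod n d == 0 && d != PySem.Int.floordiv n d)).map
        (fun d => PySem.Int.floordiv n d) ↔
      ∃ d, 1 ≤ d ∧ d ≤ n ∧ d * d ≤ n ∧ PySem.Int.mod n d = 0 ∧
        d ≠ PySem.Int.floordiv n d ∧ PySem.Int.floordiv n d = x := by
    intro x
    simp only [List.mem_map, List.mem_filter, hmemR, decide_eq_true_eq,
      Bool.and_eq_true, beq_iff_eq, bne_iff_ne, ne_eq]
    constructor
    · rintro ⟨d, ⟨⟨⟨hd1, hd2⟩, hd3⟩, hd4, hd5⟩, hd6⟩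
      exact ⟨d, hd1, hd2, hd3, hd4, hd5, hd6⟩
    · rintro ⟨d, hd1, hd2, hd3, hd4, hd5, hd6⟩
      exact ⟨d, ⟨⟨⟨hd1, hd2⟩, hd3⟩, hd4, hd5⟩, hd6⟩
  -- a large element is a divisor above the square root
  have hlarge_big : ∀ x, (∃ d, 1 ≤ d ∧ d ≤ n ∧ d * d ≤ n ∧ PySem.Int.mod n d = 0 ∧
        d ≠ PySem.Int.floordiv n d ∧ PySem.Int.floordiv n d = x) →
      1 ≤ x ∧ x ≤ n ∧ n < x * x ∧ PySem.Int.mod n x = 0 := by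
    rintro x ⟨d, hd1, hd2, hd3, hd4, hd5, rfl⟩
    obtain ⟨he1, he2, he3, he4, he5⟩ := div_facts n d hd1 hd2 hd4
    refine ⟨he1, he2, ?_, he4⟩
    have hdlt : d < PySem.Int.floordiv n d := by
      by_cases h : d < PySem.Int.floordiv n d
      · exact h
      · exfalso
        rw [not_lt] at h
        have h6 : PySem.Int.floordiv n d * d ≤ d * d :=
          mul_le_mul_of_nonneg_right h (by omega)
        have hdd : PySem.Int.floordiv n d * d = d * d := by omega
        exact hd5 (mul_right_cancel₀ (b := d) (by omega) hdd).symm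
    calc n = PySem.Int.floordiv n d * d := he3.symm
      _ < PySem.Int.floordiv n d * PySem.Int.floordiv n d :=
          mul_lt_mul_of_pos_left hdlt (by omega)
  apply eq_of_pairwise_lt_of_mem_iff
  · -- LHS pairwise (<)
    rw [List.pairwise_append]
    refine ⟨?_, ?_, ?_⟩
    · exact (PySem.List.pairwise_lt_pyRange_one 1 (n + 1)).sublist
        (List.filter_sublist.trans List.filter_sublist)
    · rw [List.pairwise_reverse, List.pairwise_map]
      apply List.Pairwise.imp_of_mem
        ?_ ((PySem.List.pairwise_lt_pyRange_one 1 (n + 1)).sublist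
          (List.filter_sublist.trans List.filter_sublist))
      intro a b hma hmb hab
      rw [List.mem_filter, List.mem_filter] at hma hmb
      have hra := (hmemR a).mp hma.1.1
      have hrb := (hmemR b).mp hmb.1.1
      have hda : PySem.Int.mod n a = 0 := by
        have := hma.2
        simp only [Bool.and_eq_true, beq_iff_eq] at this
        exact this.1
      have hdb : PySem.Int.mod n b = 0 := by
        have := hmb.2
        simp only [Bool.and_eq_true, beq_iff_eq] at this
        exact this.1
      obtain ⟨ha1, -, ha3, -, -⟩ := div_facts n a hra.1 hra.2 hda
      obtain ⟨hb1, -, hb3, -, -⟩ := div_facts n b hrb.1 hrb.2 hdb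
      by_contra hcon
      rw [not_lt] at hcon
      have : PySem.Int.floordiv n a * a < PySem.Int.floordiv n b * b := by
        calc PySem.Int.floordiv n a * a ≤ PySem.Int.floordiv n b * a :=
              mul_le_mul_of_nonneg_right hcon (by omega)
          _ < PySem.Int.floordiv n b * b := mul_lt_mul_of_pos_left hab (by omega)
      omega
    · -- cross: every small element < every large element
      intro a hma b hmb
      rw [List.mem_reverse] at hmb
      have hA := (hsmall a).mp hma
      have hB := hlarge_big b ((hlarge b).mp hmb)
      by_contra hcon
      rw [not_lt] at hcon
      have : b * b ≤ a * a := mul_le_mul hcon hcon (by omega) (by omega)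
      omega
  · -- RHS pairwise (<)
    exact (PySem.List.pairwise_lt_pyRange_one 1 (n + 1)).sublist List.filter_sublist
  · -- same membership
    intro x
    rw [List.mem_append, List.mem_reverse, hsmall, hlarge, List.mem_filter, hmemR]
    simp only [beq_iff_eq]
    constructor
    · rintro (⟨h1, h2, h3, h4⟩ | hbig)
      · exact ⟨⟨h1, h2⟩, h4⟩
      · have := hlarge_big x hbig
        exact ⟨⟨this.1, this.2.1⟩, this.2.2.2⟩
    · rintro ⟨⟨h1, h2⟩, h4⟩
      by_cases hsq : x * x ≤ n
      · exact Or.inl ⟨h1, h2, hsq, h4⟩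
      · right
        obtain ⟨he1, he2, he3, he4, he5⟩ := div_facts n x h1 h2 h4
        refine ⟨PySem.Int.floordiv n x, he1, he2, ?_, he4, ?_, he5⟩
        · -- cofactor is below the square root
          have hlt : PySem.Int.floordiv n x < x := by
            by_cases h : PySem.Int.floordiv n x < x
            · exact h
            · exfalso
              rw [not_lt] at h
              have : x * x ≤ PySem.Int.floordiv n x * x :=
                mul_le_mul_of_nonneg_right h (by omega)
              omega
          calc PySem.Int.floordiv n x * PySem.Int.floordiv n x
              ≤ PySem.Int.floordiv n x * x := by
                apply mul_le_mul_of_nonneg_left hlt.le (by omega)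
            _ = n := he3
        · -- and differs from x
          intro heq
          have hlt : PySem.Int.floordiv n x < x := by
            by_cases h : PySem.Int.floordiv n x < x
            · exact h
            · exfalso
              rw [not_lt] at h
              have : x * x ≤ PySem.Int.floordiv n x * x :=
                mul_le_mul_of_nonneg_right h (by omega)
              omega
          omega

-- ===== VERDICT (by name: the statement is the Claim_ definition above) =====
theorem solve_spec : Claim_equal_solve := by
  intro n p _ hpre
  unfold Spec_solve
  have hA := loop_eq n p hpre (n - ((0 : Nat) : Int)).toNat 0 rfl
  simp only [Nat.cast_zero, List.take_zero, zero_add] at hA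
  rw [solve, hA, solve_alt]
  rw [tryLens_eq, halves_eq, find?_filter']
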